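-- pv_equiv track=rewrite | github.com/TimoLassmann/kalign | benchmarks/alignment_diagnostics.py | alignment_to_pairs
-- ===== SOURCE A (Python) =====
-- def alignment_to_pairs(names, seqs):
--     """Extract all aligned residue pairs (i.e. same column, both non-gap)."""
--     pairs = set()
--     n = len(seqs)
--     alen = len(seqs[0])
--     # Build residue index arrays
--     res_idx = []
--     for s in range(n):
--         ri = []
--         c = 0
--         for col in range(alen):
--             if seqs[s][col] != "-":
--                 ri.append(c)
--                 c += 1
--             else:
--                 ri.append(-1)
--         res_idx.append(ri)
--
--     for col in range(alen):
--         for i in range(n):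
--             if res_idx[i][col] < 0:
--                 continue
--             for j in range(i + 1, n):
--                 if res_idx[j][col] < 0:
--                     continue
--                 pairs.add((i, j, res_idx[i][col], res_idx[j][col]))
--     return pairs
-- ===== SOURCE B (Python) =====
-- def alignment_to_pairs(names, seqs):
--     """Extract all aligned residue pairs (i.e. same column, both non-gap)."""
--     pairs = set()
--     counts = [0] * len(seqs)
--     for col in range(len(seqs[0])):
--         present = []
--         for s in range(len(seqs)):
--             if seqs[s][col] != "-":
--                 present.append((s, counts[s]))
--                 counts[s] += 1
--         for a in range(len(present)):
--             for b in range(a + 1, len(present)):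
--                 pairs.add((present[a][0], present[b][0], present[a][1], present[b][1]))
--     return pairs
-- ===== Notes on version B (the rewrite author's own statement) =====
-- stated objective: simpler
-- what changed: B drops A's precomputed n x alen residue-index matrix and per-column scan over all sequence pairs; instead it sweeps the columns once with running per-sequence residue counters, builds the compact list of sequences present in the column, and pairs only those.
import Mathlib
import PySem

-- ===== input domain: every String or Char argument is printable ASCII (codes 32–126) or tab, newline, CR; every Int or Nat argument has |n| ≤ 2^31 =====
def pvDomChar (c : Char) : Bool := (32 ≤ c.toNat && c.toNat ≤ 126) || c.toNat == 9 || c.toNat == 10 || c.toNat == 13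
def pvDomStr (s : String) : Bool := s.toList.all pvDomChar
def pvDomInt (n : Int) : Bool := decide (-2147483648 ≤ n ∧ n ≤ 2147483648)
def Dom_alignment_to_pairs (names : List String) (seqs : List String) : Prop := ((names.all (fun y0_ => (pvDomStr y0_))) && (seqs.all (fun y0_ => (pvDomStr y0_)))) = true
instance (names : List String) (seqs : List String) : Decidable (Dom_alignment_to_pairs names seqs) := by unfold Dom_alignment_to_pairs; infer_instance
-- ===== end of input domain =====

-- B replaces A's precomputed n×alen residue-index matrix and triple nested scan over all sequences
-- by a single column sweep with running per-sequence counters, pairing only the compact list of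
-- sequences actually present in the column (objective: alternative/simpler data structure).

-- ===== PORT A =====
-- inner loop of A's res_idx construction: one column step of "if seqs[s][col] != '-': append c; c += 1 else append -1"
def pvA_step (s : String) (acc : List Int × Int) (col : Nat) : List Int × Int :=
  match PySem.Str.pyGet? s (col : Int) with
  | some ch => if ch ≠ '-' then (acc.1 ++ [acc.2], acc.2 + 1) else (acc.1 ++ [(-1 : Int)], acc.2)
  | none => (acc.1 ++ [(-1 : Int)], acc.2)   -- Python raises IndexError here; excluded by Pre_

def pvA_buildRi (s : String) (alen : Nat) : List Int :=
  ((List.range alen).foldl (pvA_step s) ([], 0)).1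

def alignment_to_pairs (names : List String) (seqs : List String) : List (Int × Int × Int × Int) :=
  match seqs[0]? with
  | none => []   -- Python: len(seqs[0]) raises IndexError; excluded by Pre_
  | some s0 =>
    let n := seqs.length
    let alen := s0.toList.length
    let res_idx : List (List Int) :=
      (List.range n).foldl (fun acc s => acc ++ [pvA_buildRi (seqs.getD s "") alen]) []
    (List.range alen).foldl (fun pairs col =>
      (List.range n).foldl (fun pairs i =>
        if (res_idx.getD i []).getD col (-1) < 0 then pairs
        else (List.range' (i+1) (n - (i+1))).foldl (fun pairs j =>
          if (res_idx.getD j []).getD col (-1) < 0 then pairs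
          else PySem.Set.add pairs ((i : Int), (j : Int),
                 (res_idx.getD i []).getD col (-1), (res_idx.getD j []).getD col (-1))) pairs) pairs)
      PySem.Set.empty

-- ===== PORT B =====
def alignment_to_pairs_alt (names : List String) (seqs : List String) : List (Int × Int × Int × Int) :=
  match seqs[0]? with
  | none => []   -- Python: len(seqs[0]) raises IndexError; excluded by Pre_
  | some s0 =>
    let n := seqs.length
    ((List.range s0.toList.length).foldl
      (fun (st : List Int × PySem.Set (Int × Int × Int × Int)) (col : Nat) =>
        let pc := (List.range n).foldl (fun (pc : List (Int × Int) × List Int) (s : Nat) =>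
            match PySem.Str.pyGet? (seqs.getD s "") (col : Int) with
            | some ch =>
                if ch ≠ '-' then
                  (pc.1 ++ [((s : Int), pc.2.getD s 0)], pc.2.set s (pc.2.getD s 0 + 1))
                else pc
            | none => pc   -- Python raises IndexError here; excluded by Pre_
          ) ([], st.1)
        let present := pc.1
        ((pc.2),
          (List.range present.length).foldl (fun pairs a =>
            (List.range' (a+1) (present.length - (a+1))).foldl (fun pairs b =>
              PySem.Set.add pairs ((present.getD a (0,0)).1, (present.getD b (0,0)).1,
                (present.getD a (0,0)).2, (present.getD b (0,0)).2)) pairs) st.2))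
      (List.replicate n (0 : Int), PySem.Set.empty)).2

-- ===== PRECONDITION & SPEC =====
-- Pre_ excludes exactly the inputs where both Pythons raise IndexError: an empty seqs list
-- (seqs[0]) and ragged inputs where some sequence is shorter than seqs[0].
def Pre_alignment_to_pairs (names : List String) (seqs : List String) : Prop :=
  seqs ≠ [] ∧ ∀ s ∈ seqs, (seqs.getD 0 "").toList.length ≤ s.toList.length
instance (names : List String) (seqs : List String) : Decidable (Pre_alignment_to_pairs names seqs) := by
  unfold Pre_alignment_to_pairs; infer_instance

def pvWitness_alignment_to_pairs : List String × List String := (["a", "b", "c"], ["AB-", "A-B", "-CC"])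

def Spec_alignment_to_pairs (names : List String) (seqs : List String) (out : List (Int × Int × Int × Int)) : Prop := out = alignment_to_pairs_alt names seqs
instance (names : List String) (seqs : List String) (out : List (Int × Int × Int × Int)) : Decidable (Spec_alignment_to_pairs names seqs out) := by unfold Spec_alignment_to_pairs; infer_instance

-- ===== CLAIM (what is proved, stated in full; the proofs are below) =====
def Claim_equal_alignment_to_pairs : Prop := ∀ (names : List String) (seqs : List String), Dom_alignment_to_pairs names seqs → Pre_alignment_to_pairs names seqs → Spec_alignment_to_pairs names seqs (alignment_to_pairs names seqs)


-- ===== LEMMAS AND PROOFS =====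

-- the character list of seqs[i]
def pvChi (seqs : List String) (i : Nat) : List Char := (seqs.getD i "").toList

-- number of non-gap characters among the first k characters
def pvCnt (l : List Char) (k : Nat) : Int := ((l.take k).countP (fun c => c ≠ '-') : Int)

-- "sequence i has a gap in column col"
def pvQ (seqs : List String) (col i : Nat) : Bool := decide ((pvChi seqs i).getD col ' ' = '-')

-- the (seq index, residue index) entry of a present sequence
def pvH (seqs : List String) (col : Nat) (i : Nat) : Int × Int := ((i : Int), pvCnt (pvChi seqs i) col)

-- the value A stores in res_idx[s][col]
def pvRiVal (l : List Char) (col : Nat) : Int := if l.getD col ' ' = '-' then -1 else pvCnt l col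

-- all ordered pairs (l[a], l[b]) with a < b, in A's and B's common emission order
def pvPairsStream {α : Type} : List α → List (α × α)
  | [] => []
  | x :: xs => xs.map (fun y => (x, y)) ++ pvPairsStream xs

-- the compact per-column list of present sequences with their residue indices
def pvPresent (seqs : List String) (col : Nat) : List (Int × Int) :=
  ((List.range seqs.length).filter (fun i => !pvQ seqs col i)).map (pvH seqs col)

def pvEmit (pairs : PySem.Set (Int × Int × Int × Int)) (p : (Int × Int) × (Int × Int)) :
    PySem.Set (Int × Int × Int × Int) :=
  PySem.Set.add pairs (p.1.1, p.2.1, p.1.2, p.2.2)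

lemma pv_foldl_range_getD {α β : Type} (xs : List α) (f : β → α → β) (init : β) (d : α) :
    (List.range xs.length).foldl (fun acc b => f acc (xs.getD b d)) init = xs.foldl f init := by
  induction xs generalizing init with
  | nil => simp
  | cons x xs ih =>
    rw [List.length_cons, List.range_succ_eq_map, List.foldl_cons, List.foldl_map]
    simpa using ih (f init x)

lemma pv_foldl_id {α β : Type} (l : List α) (init : β) : l.foldl (fun acc _ => acc) init = init := by
  induction l generalizing init with
  | nil => rfl
  | cons x xs ih => simpa using ih init

lemma pv_pairsStream_filter {α β : Type} (l : List α) (q : α → Bool) (g : β → α → α → β) (init : β) :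
    (pvPairsStream l).foldl (fun acc p => if q p.1 || q p.2 then acc else g acc p.1 p.2) init
    = (pvPairsStream (l.filter (fun x => !q x))).foldl (fun acc p => g acc p.1 p.2) init := by
  induction l generalizing init with
  | nil => rfl
  | cons x xs ih =>
    by_cases hx : q x
    · simp only [pvPairsStream, List.filter_cons, hx, Bool.not_true, List.foldl_append,
        List.foldl_map, Bool.true_or, if_pos, if_false, Bool.false_eq_true]
      rw [pv_foldl_id, ih]
    · simp only [pvPairsStream, List.filter_cons, hx, Bool.not_false, List.foldl_append,
        List.foldl_map, Bool.false_or, if_true]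
      rw [show (fun (x_1 : β) y => if q y = true then x_1 else g x_1 x y)
            = (fun (x_1 : β) y => if (!q y) = true then g x_1 x y else x_1) from by
          funext a y; by_cases h : q y <;> simp [h]]
      rw [← List.foldl_filter, ih]

lemma pv_pairsStream_map {α γ : Type} (l : List α) (h : α → γ) :
    pvPairsStream (l.map h) = (pvPairsStream l).map (fun p => (h p.1, h p.2)) := by
  induction l with
  | nil => rfl
  | cons x xs ih => simp [pvPairsStream, ih, Function.comp]

lemma pv_shift {α β : Type} (x : α) (xs : List α) (d : α) (h : β → α → β) (s n : Nat) (acc : β) :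
    (List.range' (s+1) n).foldl (fun acc b => h acc ((x :: xs).getD b d)) acc
    = (List.range' s n).foldl (fun acc b => h acc (xs.getD b d)) acc := by
  rw [List.range'_eq_map_range, List.range'_eq_map_range, List.foldl_map, List.foldl_map]
  congr 1
  funext a b
  rw [show s + 1 + b = (s + b) + 1 from by omega, List.getD_cons_succ]

lemma pv_double_loop {α β : Type} (l : List α) (d : α) (g : β → α → α → β) (init : β) :
    (List.range l.length).foldl (fun acc a =>
      (List.range' (a+1) (l.length - (a+1))).foldl (fun acc b => g acc (l.getD a d) (l.getD b d)) acc) init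
    = (pvPairsStream l).foldl (fun acc p => g acc p.1 p.2) init := by
  induction l generalizing init with
  | nil => simp [pvPairsStream]
  | cons x xs ih =>
    rw [List.length_cons, List.range_succ_eq_map, List.foldl_cons, List.foldl_map]
    have h0 : (List.range' (0+1) (xs.length + 1 - (0+1))).foldl
        (fun acc b => g acc ((x :: xs).getD 0 d) ((x :: xs).getD b d)) init
        = xs.foldl (fun acc y => g acc x y) init := by
      rw [pv_shift, Nat.add_sub_cancel]
      rw [show (List.range' 0 xs.length) = List.range xs.length from by
        rw [List.range'_eq_map_range]; simp]
      exact pv_foldl_range_getD xs (fun acc y => g acc x y) init d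
    rw [h0]
    have hfun : (fun (acc : β) (a : Nat) =>
        (List.range' (Nat.succ a + 1) (xs.length + 1 - (Nat.succ a + 1))).foldl
          (fun acc b => g acc ((x :: xs).getD (Nat.succ a) d) ((x :: xs).getD b d)) acc)
        = (fun (acc : β) (a : Nat) =>
        (List.range' (a+1) (xs.length - (a+1))).foldl
          (fun acc b => g acc (xs.getD a d) (xs.getD b d)) acc) := by
      funext acc a
      rw [show Nat.succ a + 1 = (a+1) + 1 from rfl, Nat.succ_sub_succ, List.getD_cons_succ, pv_shift]
    rw [hfun, ih]
    simp [pvPairsStream, List.foldl_map]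

lemma pv_pyget (s : String) (col : Nat) (h : col < s.toList.length) :
    PySem.Str.pyGet? s (col : Int) = some (s.toList.getD col ' ') := by
  simp [PySem.Str.pyGet?, List.getD_eq_getElem?_getD, List.getElem?_eq_getElem h]

lemma pv_getD_map_range {α : Type} (n m : Nat) (f : Nat → α) (d : α) (h : m < n) :
    ((List.range n).map f).getD m d = f m := by
  simp [List.getD_eq_getElem?_getD, List.getElem?_map, List.getElem?_range h]

lemma pv_set_map_range {α : Type} (n m : Nat) (f : Nat → α) (v : α) :
    ((List.range n).map f).set m v = (List.range n).map (fun i => if i = m then v else f i) := by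
  apply List.ext_getElem
  · simp
  · intro i h1 h2
    simp only [List.getElem_set, List.getElem_map, List.getElem_range]
    by_cases hi : i = m <;> simp [hi]
    intro h; exact absurd h.symm hi

lemma pv_cnt_nonneg (l : List Char) (m : Nat) : 0 ≤ pvCnt l m := by
  simp [pvCnt]

lemma pv_cnt_succ (l : List Char) (m : Nat) (h : m < l.length) :
    pvCnt l (m+1) = pvCnt l m + (if l.getD m ' ' = '-' then 0 else 1) := by
  unfold pvCnt
  rw [List.take_add_one, List.countP_append]
  rw [List.getElem?_eq_getElem h, List.getD_eq_getElem?_getD, List.getElem?_eq_getElem h]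
  by_cases hc : l[m] = '-' <;> simp [hc]

lemma pv_riVal_neg_iff (l : List Char) (col : Nat) :
    (pvRiVal l col < 0) ↔ (l.getD col ' ' = '-') := by
  unfold pvRiVal
  by_cases h : l.getD col ' ' = '-'
  · rw [if_pos h]
    simp only [h, iff_true]
    norm_num
  · rw [if_neg h]
    simp only [h, iff_false]
    exact not_lt.mpr (pv_cnt_nonneg l col)

lemma pv_buildRi_pair (s : String) (m : Nat) (h : m ≤ s.toList.length) :
    (List.range m).foldl (pvA_step s) ([], 0)
    = ((List.range m).map (pvRiVal s.toList), pvCnt s.toList m) := by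
  induction m with
  | zero => simp [pvCnt]
  | succ m ih =>
    rw [List.range_succ, List.foldl_append, ih (by omega), List.foldl_cons, List.foldl_nil]
    have hm : m < s.toList.length := by omega
    unfold pvA_step
    rw [pv_pyget s m hm]
    dsimp only
    rw [List.map_append, List.map_cons, List.map_nil]
    rw [pv_cnt_succ s.toList m hm]
    by_cases hc : s.toList.getD m ' ' = '-' <;>
      simp only [List.getD_eq_getElem?_getD] at hc <;>
      simp [pvRiVal, hc, List.getD_eq_getElem?_getD]

lemma pv_ri_getD (s : String) (alen col : Nat) (hcol : col < alen) (hlen : alen ≤ s.toList.length) :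
    (pvA_buildRi s alen).getD col (-1) = pvRiVal s.toList col := by
  unfold pvA_buildRi
  rw [pv_buildRi_pair s alen hlen]
  exact pv_getD_map_range alen col _ _ hcol

-- A's per-column double loop equals the fold of the emission stream of the present list
lemma pv_getD_range (n a : Nat) (h : a < n) : (List.range n).getD a 0 = a := by
  simp [List.getD_eq_getElem?_getD, List.getElem?_range h]

lemma pv_colA (seqs : List String) (alen col : Nat)
    (hcol : col < alen) (hlen : ∀ i < seqs.length, alen ≤ (pvChi seqs i).length)
    (pairs : PySem.Set (Int × Int × Int × Int)) :
    (List.range seqs.length).foldl (fun pairs i =>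
        if (((List.range seqs.length).map (fun s => pvA_buildRi (seqs.getD s "") alen)).getD i []).getD col (-1) < 0 then pairs
        else (List.range' (i+1) (seqs.length - (i+1))).foldl (fun pairs j =>
          if (((List.range seqs.length).map (fun s => pvA_buildRi (seqs.getD s "") alen)).getD j []).getD col (-1) < 0 then pairs
          else PySem.Set.add pairs ((i : Int), (j : Int),
                 (((List.range seqs.length).map (fun s => pvA_buildRi (seqs.getD s "") alen)).getD i []).getD col (-1),
                 (((List.range seqs.length).map (fun s => pvA_buildRi (seqs.getD s "") alen)).getD j []).getD col (-1))) pairs) pairs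
    = (pvPairsStream (pvPresent seqs col)).foldl pvEmit pairs := by
  have hri : ∀ i < seqs.length,
      (((List.range seqs.length).map (fun s => pvA_buildRi (seqs.getD s "") alen)).getD i []).getD col (-1)
      = pvRiVal (pvChi seqs i) col := by
    intro i hi
    rw [pv_getD_map_range seqs.length i _ _ hi]
    exact pv_ri_getD _ alen col hcol (hlen i hi)
  have hneg : ∀ i < seqs.length,
      ((((List.range seqs.length).map (fun s => pvA_buildRi (seqs.getD s "") alen)).getD i []).getD col (-1) < 0)
      ↔ pvQ seqs col i = true := by
    intro i hi
    rw [hri i hi, pv_riVal_neg_iff, pvQ]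
    simp
  -- step 1: bring A's skip-loops into the canonical indexed double-loop shape
  have step1 : (List.range seqs.length).foldl (fun pairs i =>
        if (((List.range seqs.length).map (fun s => pvA_buildRi (seqs.getD s "") alen)).getD i []).getD col (-1) < 0 then pairs
        else (List.range' (i+1) (seqs.length - (i+1))).foldl (fun pairs j =>
          if (((List.range seqs.length).map (fun s => pvA_buildRi (seqs.getD s "") alen)).getD j []).getD col (-1) < 0 then pairs
          else PySem.Set.add pairs ((i : Int), (j : Int),
                 (((List.range seqs.length).map (fun s => pvA_buildRi (seqs.getD s "") alen)).getD i []).getD col (-1),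
                 (((List.range seqs.length).map (fun s => pvA_buildRi (seqs.getD s "") alen)).getD j []).getD col (-1))) pairs) pairs
      = (List.range seqs.length).foldl (fun acc a =>
          (List.range' (a+1) (seqs.length - (a+1))).foldl (fun acc b =>
            (fun (acc : PySem.Set (Int × Int × Int × Int)) (a b : Nat) =>
              if pvQ seqs col a || pvQ seqs col b then acc
              else PySem.Set.add acc ((a : Int), (b : Int), pvCnt (pvChi seqs a) col, pvCnt (pvChi seqs b) col))
              acc ((List.range seqs.length).getD a 0) ((List.range seqs.length).getD b 0)) acc) pairs := by
    apply PySem.List.foldl_congr_mem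
    intro acc a ha
    rw [List.mem_range] at ha
    rw [pv_getD_range seqs.length a ha]
    by_cases hqa : pvQ seqs col a = true
    · rw [if_pos ((hneg a ha).mpr hqa)]
      rw [show (fun (acc : PySem.Set (Int × Int × Int × Int)) (b : Nat) =>
            (fun (acc : PySem.Set (Int × Int × Int × Int)) (a b : Nat) =>
              if pvQ seqs col a || pvQ seqs col b then acc
              else PySem.Set.add acc ((a : Int), (b : Int), pvCnt (pvChi seqs a) col, pvCnt (pvChi seqs b) col))
              acc a ((List.range seqs.length).getD b 0))
          = (fun (acc : PySem.Set (Int × Int × Int × Int)) (_ : Nat) => acc) from by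
        funext acc b; simp [hqa]]
      rw [pv_foldl_id]
    · rw [if_neg (by rw [hneg a ha]; exact hqa)]
      apply PySem.List.foldl_congr_mem
      intro acc2 b hb
      rw [List.mem_range'] at hb
      have hbn : b < seqs.length := by omega
      rw [pv_getD_range seqs.length b hbn]
      by_cases hqb : pvQ seqs col b = true
      · rw [if_pos ((hneg b hbn).mpr hqb)]
        simp [hqb]
      · rw [if_neg (by rw [hneg b hbn]; exact hqb)]
        rw [hri a ha, hri b hbn]
        have hva : pvRiVal (pvChi seqs a) col = pvCnt (pvChi seqs a) col := by
          unfold pvRiVal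
          rw [if_neg (by simpa [pvQ] using hqa)]
        have hvb : pvRiVal (pvChi seqs b) col = pvCnt (pvChi seqs b) col := by
          unfold pvRiVal
          rw [if_neg (by simpa [pvQ] using hqb)]
        rw [hva, hvb]
        simp [hqa, hqb]
  rw [step1]
  have hd := pv_double_loop (List.range seqs.length) 0
    (fun (acc : PySem.Set (Int × Int × Int × Int)) (a b : Nat) =>
      if pvQ seqs col a || pvQ seqs col b then acc
      else PySem.Set.add acc ((a : Int), (b : Int), pvCnt (pvChi seqs a) col, pvCnt (pvChi seqs b) col)) pairs
  rw [List.length_range] at hd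
  rw [hd]
  rw [pv_pairsStream_filter (List.range seqs.length) (pvQ seqs col)
    (fun acc a b => PySem.Set.add acc ((a : Int), (b : Int), pvCnt (pvChi seqs a) col, pvCnt (pvChi seqs b) col)) pairs]
  unfold pvPresent
  rw [pv_pairsStream_map, List.foldl_map]
  rfl

-- B's present-building loop: counters are the per-sequence running residue counts
lemma pv_colB_present (seqs : List String) (alen col : Nat) (m : Nat)
    (hm : m ≤ seqs.length) (hcol : col < alen) (hlen : ∀ i < seqs.length, alen ≤ (pvChi seqs i).length) :
    (List.range m).foldl (fun (pc : List (Int × Int) × List Int) (s : Nat) =>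
        match PySem.Str.pyGet? (seqs.getD s "") (col : Int) with
        | some ch =>
            if ch ≠ '-' then
              (pc.1 ++ [((s : Int), pc.2.getD s 0)], pc.2.set s (pc.2.getD s 0 + 1))
            else pc
        | none => pc)
      ([], (List.range seqs.length).map (fun i => pvCnt (pvChi seqs i) col))
    = (((List.range m).filter (fun i => !pvQ seqs col i)).map (pvH seqs col),
       (List.range seqs.length).map (fun i => if i < m then pvCnt (pvChi seqs i) (col+1) else pvCnt (pvChi seqs i) col)) := by
  induction m with
  | zero =>
    simp only [List.range_zero, List.foldl_nil, List.filter_nil, List.map_nil]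
    rw [Prod.mk.injEq]
    refine ⟨rfl, ?_⟩
    apply List.map_congr_left
    intro i _
    simp
  | succ m ih =>
    have hmn : m < seqs.length := by omega
    have hclen : col < (seqs.getD m "").toList.length := by
      have := hlen m hmn
      unfold pvChi at this
      omega
    rw [List.range_succ, List.foldl_append, ih (by omega), List.foldl_cons, List.foldl_nil]
    rw [pv_pyget _ col hclen]
    dsimp only
    have hgetc : ((List.range seqs.length).map
        (fun i => if i < m then pvCnt (pvChi seqs i) (col+1) else pvCnt (pvChi seqs i) col)).getD m 0
        = pvCnt (pvChi seqs m) col := by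
      rw [pv_getD_map_range seqs.length m _ _ hmn]
      simp
    by_cases hq : (seqs.getD m "").toList.getD col ' ' = '-'
    · rw [if_neg (by simp only [List.getD_eq_getElem?_getD] at hq; simpa using hq)]
      have hQ : pvQ seqs col m = true := by
        unfold pvQ pvChi
        simp only [List.getD_eq_getElem?_getD] at hq
        simp [hq]
      rw [Prod.mk.injEq]
      constructor
      · rw [List.filter_append, List.map_append]
        simp [hQ]
      · apply List.map_congr_left
        intro i hi
        rw [List.mem_range] at hi
        by_cases him : i = m
        · subst him
          have : pvCnt (pvChi seqs i) (col+1) = pvCnt (pvChi seqs i) col := by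
            rw [pv_cnt_succ (pvChi seqs i) col (by unfold pvChi; omega)]
            rw [if_pos (by simpa [pvChi] using hq)]
            ring
          simp [this]
        · have : (i < m + 1) ↔ (i < m) := by omega
          simp only [this]
    · rw [if_pos (by simp only [List.getD_eq_getElem?_getD] at hq; simpa using hq)]
      have hQ : pvQ seqs col m = false := by
        unfold pvQ pvChi
        simp only [List.getD_eq_getElem?_getD] at hq
        simp [hq]
      rw [Prod.mk.injEq]
      constructor
      · rw [List.filter_append, List.map_append, hgetc]
        simp [hQ, pvH]
      · rw [hgetc, pv_set_map_range]
        apply List.map_congr_left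
        intro i hi
        rw [List.mem_range] at hi
        by_cases him : i = m
        · subst him
          rw [if_pos rfl, if_pos (by omega)]
          rw [pv_cnt_succ (pvChi seqs i) col (by unfold pvChi; omega)]
          rw [if_neg (by simpa [pvChi] using hq)]
        · rw [if_neg him]
          have : (i < m + 1) ↔ (i < m) := by omega
          simp only [this]

-- ===== VERDICT (by name: the statement is the Claim_ definition above) =====
theorem alignment_to_pairs_spec : Claim_equal_alignment_to_pairs := by
  intro names seqs _ hpre
  unfold Spec_alignment_to_pairs
  obtain ⟨hne, hlenP⟩ := hpre
  obtain ⟨s0, rest, rfl⟩ : ∃ s0 rest, seqs = s0 :: rest := by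
    cases seqs with
    | nil => exact absurd rfl hne
    | cons a l => exact ⟨a, l, rfl⟩
  have hlen : ∀ i < (s0 :: rest).length, s0.toList.length ≤ (pvChi (s0 :: rest) i).length := by
    intro i hi
    unfold pvChi
    have hmem : (s0 :: rest).getD i "" ∈ s0 :: rest := by
      rw [List.getD_eq_getElem?_getD, List.getElem?_eq_getElem hi, Option.getD_some]
      exact List.getElem_mem hi
    simpa using hlenP _ hmem
  unfold alignment_to_pairs alignment_to_pairs_alt
  simp only [List.getElem?_cons_zero]
  rw [PySem.List.foldl_append_singleton_eq_map]
  simp only [List.nil_append]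
  have main : ∀ m, m ≤ s0.toList.length →
      List.foldl
        (fun (st : List Int × PySem.Set (Int × Int × Int × Int)) (col : Nat) =>
          ((List.foldl
                (fun (pc : List (Int × Int) × List Int) (s : Nat) =>
                  match PySem.Str.pyGet? ((s0 :: rest).getD s "") (col : Int) with
                  | some ch => if ch ≠ '-' then (pc.1 ++ [((s : Int), pc.2.getD s 0)], pc.2.set s (pc.2.getD s 0 + 1)) else pc
                  | none => pc)
                ([], st.1) (List.range (s0 :: rest).length)).2,
            List.foldl
              (fun pairs a =>
                List.foldl
                  (fun pairs b =>
                    PySem.Set.add pairs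
                      (((List.foldl
                            (fun (pc : List (Int × Int) × List Int) (s : Nat) =>
                              match PySem.Str.pyGet? ((s0 :: rest).getD s "") (col : Int) with
                              | some ch => if ch ≠ '-' then (pc.1 ++ [((s : Int), pc.2.getD s 0)], pc.2.set s (pc.2.getD s 0 + 1)) else pc
                              | none => pc)
                            ([], st.1) (List.range (s0 :: rest).length)).1.getD a (0, 0)).1,
                        ((List.foldl
                            (fun (pc : List (Int × Int) × List Int) (s : Nat) =>
                              match PySem.Str.pyGet? ((s0 :: rest).getD s "") (col : Int) with
                              | some ch => if ch ≠ '-' then (pc.1 ++ [((s : Int), pc.2.getD s 0)], pc.2.set s (pc.2.getD s 0 + 1)) else pc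
                              | none => pc)
                            ([], st.1) (List.range (s0 :: rest).length)).1.getD b (0, 0)).1,
                        ((List.foldl
                            (fun (pc : List (Int × Int) × List Int) (s : Nat) =>
                              match PySem.Str.pyGet? ((s0 :: rest).getD s "") (col : Int) with
                              | some ch => if ch ≠ '-' then (pc.1 ++ [((s : Int), pc.2.getD s 0)], pc.2.set s (pc.2.getD s 0 + 1)) else pc
                              | none => pc)
                            ([], st.1) (List.range (s0 :: rest).length)).1.getD a (0, 0)).2,
                        ((List.foldl
                            (fun (pc : List (Int × Int) × List Int) (s : Nat) =>
                              match PySem.Str.pyGet? ((s0 :: rest).getD s "") (col : Int) with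
                              | some ch => if ch ≠ '-' then (pc.1 ++ [((s : Int), pc.2.getD s 0)], pc.2.set s (pc.2.getD s 0 + 1)) else pc
                              | none => pc)
                            ([], st.1) (List.range (s0 :: rest).length)).1.getD b (0, 0)).2))
                  pairs
                  (List.range' (a + 1)
                    ((List.foldl
                        (fun (pc : List (Int × Int) × List Int) (s : Nat) =>
                          match PySem.Str.pyGet? ((s0 :: rest).getD s "") (col : Int) with
                          | some ch => if ch ≠ '-' then (pc.1 ++ [((s : Int), pc.2.getD s 0)], pc.2.set s (pc.2.getD s 0 + 1)) else pc
                          | none => pc)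
                        ([], st.1) (List.range (s0 :: rest).length)).1.length - (a + 1))))
              st.2
              (List.range
                (List.foldl
                    (fun (pc : List (Int × Int) × List Int) (s : Nat) =>
                      match PySem.Str.pyGet? ((s0 :: rest).getD s "") (col : Int) with
                      | some ch => if ch ≠ '-' then (pc.1 ++ [((s : Int), pc.2.getD s 0)], pc.2.set s (pc.2.getD s 0 + 1)) else pc
                      | none => pc)
                    ([], st.1) (List.range (s0 :: rest).length)).1.length)))
        (List.replicate (s0 :: rest).length (0 : Int), PySem.Set.empty) (List.range m)
      = ((List.range (s0 :: rest).length).map (fun i => pvCnt (pvChi (s0 :: rest) i) m),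
         List.foldl
          (fun pairs col =>
            List.foldl
              (fun pairs i =>
                if (((List.range (s0 :: rest).length).map (fun s => pvA_buildRi ((s0 :: rest).getD s "") s0.toList.length)).getD i []).getD col (-1) < 0 then pairs
                else
                  List.foldl
                    (fun pairs j =>
                      if (((List.range (s0 :: rest).length).map (fun s => pvA_buildRi ((s0 :: rest).getD s "") s0.toList.length)).getD j []).getD col (-1) < 0 then pairs
                      else
                        PySem.Set.add pairs
                          ((i : Int), (j : Int),
                            (((List.range (s0 :: rest).length).map (fun s => pvA_buildRi ((s0 :: rest).getD s "") s0.toList.length)).getD i []).getD col (-1),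
                            (((List.range (s0 :: rest).length).map (fun s => pvA_buildRi ((s0 :: rest).getD s "") s0.toList.length)).getD j []).getD col (-1)))
                    pairs (List.range' (i + 1) ((s0 :: rest).length - (i + 1))))
              pairs (List.range (s0 :: rest).length))
          PySem.Set.empty (List.range m)) := by
    intro m
    induction m with
    | zero =>
      intro _
      simp only [List.range_zero, List.foldl_nil, Prod.mk.injEq]
      have : ∀ i ∈ List.range (s0 :: rest).length, pvCnt (pvChi (s0 :: rest) i) 0 = 0 := by
        intro i _; simp [pvCnt]
      rw [List.map_congr_left this]
      simp [List.map_const']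
    | succ m ih =>
      intro hm
      have hcol : m < s0.toList.length := by omega
      rw [List.range_succ, List.foldl_append, List.foldl_append, ih (by omega),
        List.foldl_cons, List.foldl_nil, List.foldl_cons, List.foldl_nil]
      dsimp only
      rw [pv_colB_present (s0 :: rest) s0.toList.length m (s0 :: rest).length le_rfl hcol hlen]
      dsimp only
      have hcountsfix : (List.range (s0 :: rest).length).map
          (fun i => if i < (s0 :: rest).length then pvCnt (pvChi (s0 :: rest) i) (m+1) else pvCnt (pvChi (s0 :: rest) i) m)
          = (List.range (s0 :: rest).length).map (fun i => pvCnt (pvChi (s0 :: rest) i) (m+1)) := by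
        apply List.map_congr_left
        intro i hi
        rw [List.mem_range] at hi
        rw [if_pos hi]
      rw [hcountsfix, Prod.mk.injEq]
      refine ⟨rfl, ?_⟩
      rw [pv_colA (s0 :: rest) s0.toList.length m hcol hlen]
      have hd := pv_double_loop
        (((List.range (s0 :: rest).length).filter (fun i => !pvQ (s0 :: rest) m i)).map (pvH (s0 :: rest) m))
        ((0 : Int), (0 : Int))
        (fun (acc : PySem.Set (Int × Int × Int × Int)) (x y : Int × Int) =>
          PySem.Set.add acc (x.1, y.1, x.2, y.2))
      rw [hd]
      rfl
  have hfin := main s0.toList.length le_rfl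
  exact (congrArg Prod.snd hfin).symm
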